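-- pv_equiv track=rewrite | github.com/SUIBIANLR/SUIBIANLR | 3119005434/python/process.py | getsfrequence
-- ===== SOURCE A (Python) =====
-- def getsfrequence(words, Totalwords):
--     initialvalue = []  # 得到空列表，以便和totalwords合并成为每个键的值都是0的counts词典
--     number = 1  # 计数
--     while number <= len(Totalwords):  # totalwords中元素有多少个就生成多少个0
--         initialvalue.append(0)
--         number = number + 1
--     counts = dict(zip(Totalwords, initialvalue))  # 合并成为词典
--
--     for word in words:  # 对于每一个在目标文档中的词语进行遍历，若发现它在合并去重文档中出现过，则将它的出现次数加一
--         if word in Totalwords:  # 如果该词语出现在Totalwords中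
--             counts[word] = counts.get(word, 0) + 1  # 遍历所有词语，每出现一次其对应的值加 1
--     return counts
-- ===== SOURCE B (Python) =====
-- def getsfrequence(words, Totalwords):
--     # One unguarded counting pass over all of words, then build the result
--     # from Totalwords by lookup: no per-word membership scan of Totalwords.
--     freq = {}
--     for w in words:
--         freq[w] = freq.get(w, 0) + 1
--     return {w: freq.get(w, 0) for w in Totalwords}
-- ===== Notes on version B (the rewrite author's own statement) =====
-- stated objective: faster
-- what changed: Instead of zero-initializing a dict over Totalwords and incrementing it under a 'word in Totalwords' list scan, B counts all words unconditionally in one hash pass and then builds the result dict from Totalwords by O(1) lookups, removing the inner membership scan.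
import Mathlib
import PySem

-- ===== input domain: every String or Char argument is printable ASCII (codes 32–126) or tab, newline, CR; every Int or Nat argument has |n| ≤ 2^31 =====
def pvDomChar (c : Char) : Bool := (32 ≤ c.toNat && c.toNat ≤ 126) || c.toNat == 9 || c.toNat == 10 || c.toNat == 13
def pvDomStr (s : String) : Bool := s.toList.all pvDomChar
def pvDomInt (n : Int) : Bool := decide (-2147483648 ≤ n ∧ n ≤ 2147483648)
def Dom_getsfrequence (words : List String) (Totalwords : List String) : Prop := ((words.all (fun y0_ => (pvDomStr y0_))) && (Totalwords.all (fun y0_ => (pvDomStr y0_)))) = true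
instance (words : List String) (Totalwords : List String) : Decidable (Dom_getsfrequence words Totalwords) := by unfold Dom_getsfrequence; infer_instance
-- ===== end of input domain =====

-- B counts all words in one hash pass and then builds the result from Totalwords by lookup, instead of A's zero-init dict plus increments guarded by a 'word in Totalwords' list scan; faster in a timing run.
-- ===== PORT A =====
-- while number <= len(Totalwords): initialvalue.append(0); number += 1   (counted loop, ported as recursion on the remaining count)
def pvInitLoop (n : Nat) (acc : List Int) : List Int :=
  match n with
  | 0 => acc
  | Nat.succ m => pvInitLoop m (acc ++ [0])

def getsfrequence (words : List String) (Totalwords : List String) : List (String × Int) :=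
  let initialvalue : List Int := pvInitLoop Totalwords.length []
  let counts : PySem.Dict String Int := PySem.Dict.ofList (Totalwords.zip initialvalue)
  let counts := words.foldl (fun d word =>
      if word ∈ Totalwords then d.insert word (d.getD word 0 + 1) else d) counts
  counts.items

-- ===== PORT B =====
-- freq = {}; for w in words: freq[w] = freq.get(w,0)+1; return {w: freq.get(w,0) for w in Totalwords}
def getsfrequence_alt (words : List String) (Totalwords : List String) : List (String × Int) :=
  let freq : PySem.Dict String Int :=
    words.foldl (fun d w => d.insert w (d.getD w 0 + 1)) PySem.Dict.empty
  (Totalwords.foldl (fun d w => d.insert w (freq.getD w 0)) PySem.Dict.empty).items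

-- ===== PRECONDITION & SPEC =====
def Spec_getsfrequence (words : List String) (Totalwords : List String) (out : List (String × Int)) : Prop := out = getsfrequence_alt words Totalwords
instance (words : List String) (Totalwords : List String) (out : List (String × Int)) : Decidable (Spec_getsfrequence words Totalwords out) := by unfold Spec_getsfrequence; infer_instance

-- ===== CLAIM (what is proved, stated in full; the proofs are below) =====
def Claim_equal_getsfrequence : Prop := ∀ (words : List String) (Totalwords : List String), Dom_getsfrequence words Totalwords → Spec_getsfrequence words Totalwords (getsfrequence words Totalwords)

-- ===== LEMMAS AND PROOFS =====

-- the init while-loop produces replicate n 0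
theorem pvInitLoop_eq (n : Nat) (acc : List Int) : pvInitLoop n acc = acc ++ List.replicate n 0 := by
  induction n generalizing acc with
  | zero => simp [pvInitLoop]
  | succ m ih => simp [pvInitLoop, ih, List.replicate_succ]

theorem pvZip_replicate (xs : List String) :
    xs.zip (List.replicate xs.length (0 : Int)) = xs.map (fun x => (x, (0 : Int))) := by
  induction xs with
  | nil => rfl
  | cons a l ih => simp [List.replicate_succ, ih]

-- a foldl of inserts whose value depends only on the key
theorem pvGetD_foldl_insert_fun (f : String → Int) (Ts : List String) (d : PySem.Dict String Int) (k : String) :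
    (Ts.foldl (fun d w => d.insert w (f w)) d).getD k 0 = if k ∈ Ts then f k else d.getD k 0 := by
  induction Ts generalizing d with
  | nil => simp
  | cons a l ih =>
    rw [List.foldl_cons, ih, PySem.Dict.getD_insert]
    by_cases hl : k ∈ l
    · simp [hl]
    · by_cases hak : k = a
      · simp [hak]
      · simp [hl, hak]

-- A's counting loop: effect on a lookup
theorem pvGetD_countLoop (Ts : List String) (ws : List String) (d : PySem.Dict String Int) (k : String) :
    (ws.foldl (fun d word => if word ∈ Ts then d.insert word (d.getD word 0 + 1) else d) d).getD k 0
      = d.getD k 0 + (if k ∈ Ts then (ws.count k : Int) else 0) := by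
  induction ws generalizing d with
  | nil => simp
  | cons a l ih =>
    rw [List.foldl_cons, ih]
    by_cases hT : a ∈ Ts
    · rw [if_pos hT, PySem.Dict.getD_insert]
      by_cases hak : k = a
      · subst hak
        simp [hT, List.count_cons_self]
        ring
      · rw [if_neg hak]
        have : l.count k = (a :: l).count k := by
          simp [List.count_cons, beq_eq_false_iff_ne.mpr (fun h => hak h.symm)]
        rw [this]
    · rw [if_neg hT]
      by_cases hak : k = a
      · subst hak; simp [hT]
      · have : l.count k = (a :: l).count k := by
          simp [List.count_cons, beq_eq_false_iff_ne.mpr (fun h => hak h.symm)]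
        rw [this]

-- A's counting loop: keys unchanged when every inserted key is already present
theorem pvKeys_countLoop (Ts ws : List String) (d : PySem.Dict String Int)
    (h : ∀ w ∈ Ts, d.contains w = true) :
    (ws.foldl (fun d word => if word ∈ Ts then d.insert word (d.getD word 0 + 1) else d) d).keys = d.keys := by
  induction ws generalizing d with
  | nil => rfl
  | cons a l ih =>
    rw [List.foldl_cons]
    by_cases hT : a ∈ Ts
    · rw [if_pos hT, ih]
      · exact PySem.Dict.keys_insert_of_contains d _ (h a hT)
      · intro w hw
        rw [PySem.Dict.contains_insert]
        simp [h w hw]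
    · rw [if_neg hT]
      exact ih d h

theorem pvNodup_countLoop (Ts ws : List String) (d : PySem.Dict String Int)
    (hnd : d.keys.Nodup) :
    (ws.foldl (fun d word => if word ∈ Ts then d.insert word (d.getD word 0 + 1) else d) d).keys.Nodup := by
  induction ws generalizing d with
  | nil => exact hnd
  | cons a l ih =>
    rw [List.foldl_cons]
    by_cases hT : a ∈ Ts
    · rw [if_pos hT]
      exact ih _ (PySem.Dict.nodup_keys_insert _ _ _ hnd)
    · rw [if_neg hT]
      exact ih d hnd

theorem pvKeys_foldl_insert_fun (f : String → Int) (Ts : List String) :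
    (Ts.foldl (fun d w => d.insert w (f w)) PySem.Dict.empty).keys = PySem.List.dedup Ts := by
  rw [PySem.Dict.keys_foldl_insert]
  simp [PySem.Dict.keys_empty, PySem.Set.update, PySem.Set.ofList, PySem.List.dedup_eq_ofList]

theorem pvOfList_eq_foldl (xs : List (String × Int)) :
    PySem.Dict.ofList xs = xs.foldl (fun d p => d.insert p.1 p.2) PySem.Dict.empty := by
  simp [PySem.Dict.ofList, PySem.Dict.update]

theorem getsfrequence_spec' (words Totalwords : List String) :
    getsfrequence words Totalwords = getsfrequence_alt words Totalwords := by
  unfold getsfrequence getsfrequence_alt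
  simp only [pvInitLoop_eq, List.nil_append, pvZip_replicate, pvOfList_eq_foldl]
  rw [List.foldl_map]
  set d0 : PySem.Dict String Int :=
    Totalwords.foldl (fun d w => d.insert w ((fun x => (x, (0 : Int))) w).2) PySem.Dict.empty with hd0
  set freq : PySem.Dict String Int :=
    words.foldl (fun d w => d.insert w (d.getD w 0 + 1)) PySem.Dict.empty with hfreq
  have hfreqD : ∀ k, freq.getD k 0 = (words.count k : Int) := by
    intro k
    rw [hfreq, PySem.Dict.getD_foldl_insert_add_one]
    simp
  set dB : PySem.Dict String Int :=
    Totalwords.foldl (fun d w => d.insert w (freq.getD w 0)) PySem.Dict.empty with hdB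
  have hk0 : d0.keys = PySem.List.dedup Totalwords := pvKeys_foldl_insert_fun (fun _ => 0) Totalwords
  have hkB : dB.keys = PySem.List.dedup Totalwords := pvKeys_foldl_insert_fun _ _
  have hnd0 : d0.keys.Nodup := by rw [hk0]; exact PySem.List.nodup_dedup _
  have hndB : dB.keys.Nodup := by rw [hkB]; exact PySem.List.nodup_dedup _
  set dA : PySem.Dict String Int :=
    words.foldl (fun d word => if word ∈ Totalwords then d.insert word (d.getD word 0 + 1) else d) d0 with hdA
  have hkA : dA.keys = d0.keys := by
    apply pvKeys_countLoop
    intro w hw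
    rw [PySem.Dict.contains_iff_mem_keys, hk0, PySem.List.mem_dedup]
    exact hw
  have hndA : dA.keys.Nodup := pvNodup_countLoop _ _ _ hnd0
  rw [PySem.Dict.items_eq_map_keys dA hndA 0, PySem.Dict.items_eq_map_keys dB hndB 0,
      hkA, hk0, hkB]
  apply List.map_congr_left
  intro k hk
  have hkT : k ∈ Totalwords := (PySem.List.mem_dedup _ _).1 hk
  have h1 : dA.getD k 0 = (words.count k : Int) := by
    rw [hdA, pvGetD_countLoop, hd0, pvGetD_foldl_insert_fun (fun _ => 0)]
    simp [hkT]
  have h2 : dB.getD k 0 = (words.count k : Int) := by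
    rw [hdB, pvGetD_foldl_insert_fun (fun w => freq.getD w 0)]
    simp [hkT, hfreqD k]
  rw [h1, h2]

-- ===== VERDICT (by name: the statement is the Claim_ definition above) =====
theorem getsfrequence_spec : Claim_equal_getsfrequence := by
  intro words Totalwords _
  unfold Spec_getsfrequence
  exact getsfrequence_spec' words Totalwords
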